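-- pv_equiv track=rewrite | github.com/aleiepure/devtoolbox | src/services/text_inspector.py | _to_train_case
-- ===== SOURCE A (Python) =====
-- def _to_train_case(text:str) -> str:
--
--     ignore_next_non_alnum = True
--     output = ""
--
--     for i in range(0, len(text)):
--         if text[i].isalnum():
--             if ignore_next_non_alnum:
--                 output += text[i].upper()
--             else:
--                 output += text[i].lower()
--             ignore_next_non_alnum = False
--         elif text[i] == "\n":
--             ignore_next_non_alnum = True
--             output += text[i]
--         elif not ignore_next_non_alnum:
--             if i < len(text)-1 and text[i+1].isalnum():
--                 ignore_next_non_alnum = True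
--                 output += "-"
--
--     return output
-- ===== SOURCE B (Python) =====
-- def _to_train_case(text: str) -> str:
--     # tokenize each line into maximal alnum runs, capitalize each word, join with '-'
--     out_lines = []
--     for line in text.split('\n'):
--         words = []
--         cur = ''
--         for c in line:
--             if c.isalnum():
--                 cur += c
--             elif cur:
--                 words.append(cur)
--                 cur = ''
--         if cur:
--             words.append(cur)
--         out_lines.append('-'.join(w[0].upper() + ''.join(ch.lower() for ch in w[1:]) for w in words))
--     return '\n'.join(out_lines)
-- ===== Notes on version B (the rewrite author's own statement) =====
-- stated objective: alternative
-- what changed: Replaces A's single stateful character-by-character emitter (ignore-flag plus one-character lookahead) with a tokenize-transform-reassemble pipeline: split the text into lines, collect the maximal alphanumeric runs of each line as words, capitalize each word, join the words with dashes and the lines with newlines.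
import Mathlib
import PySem

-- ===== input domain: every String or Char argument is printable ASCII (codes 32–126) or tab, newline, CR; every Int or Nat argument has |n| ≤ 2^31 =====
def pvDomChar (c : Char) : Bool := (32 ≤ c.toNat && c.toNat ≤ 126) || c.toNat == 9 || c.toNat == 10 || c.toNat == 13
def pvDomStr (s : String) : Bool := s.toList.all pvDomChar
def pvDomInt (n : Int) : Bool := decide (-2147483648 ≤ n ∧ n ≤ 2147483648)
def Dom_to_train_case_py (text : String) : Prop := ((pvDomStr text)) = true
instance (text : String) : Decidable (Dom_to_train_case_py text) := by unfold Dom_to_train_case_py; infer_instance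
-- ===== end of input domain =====

-- B replaces A's single stateful emitter (flag + one-char lookahead) by a tokenize-transform-reassemble
-- pipeline: split into lines, collect maximal alnum runs per line, capitalize each word, join with '-'.

-- ===== PORT A =====
-- `i < len(text)-1 and text[i+1].isalnum()`: the lookahead at the next character, if any
def pvHeadAlnum : List Char → Bool
  | [] => false
  | c :: _ => PySem.Chars.isalnum c

-- the for-loop over range(0, len(text)): text[i] is the head, text[i+1] the head of the rest
def pvALoop (ignoreNext : Bool) (output : List Char) : List Char → List Char
  | [] => output
  | c :: rest =>
    if PySem.Chars.isalnum c then
      pvALoop false (output ++ [if ignoreNext then PySem.Chars.upperChar c else PySem.Chars.lowerChar c]) rest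
    else if c = '\n' then
      pvALoop true (output ++ [c]) rest
    else if !ignoreNext then
      (if pvHeadAlnum rest then pvALoop true (output ++ ['-']) rest
       else pvALoop ignoreNext output rest)
    else pvALoop ignoreNext output rest

def to_train_case_py (text : String) : String :=
  String.mk (pvALoop true [] text.toList)

-- ===== PORT B =====
-- w[0].upper() + ''.join(c.lower() for c in w[1:])
def pvCapWord : List Char → List Char
  | [] => []
  | c :: r => PySem.Chars.upperChar c :: r.map PySem.Chars.lowerChar

-- the per-line scan accumulating (words, cur)
def pvLineWords (ws : List (List Char)) (cur : List Char) : List Char → List (List Char)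
  | [] => if cur = [] then ws else ws ++ [cur]
  | c :: rest =>
    if PySem.Chars.isalnum c then pvLineWords ws (cur ++ [c]) rest
    else if cur ≠ [] then pvLineWords (ws ++ [cur]) [] rest
    else pvLineWords ws cur rest

def pvProcLine (line : List Char) : List Char :=
  PySem.Chars.join ['-'] ((pvLineWords [] [] line).map pvCapWord)

def to_train_case_py_alt (text : String) : String :=
  String.mk (PySem.Chars.join ['\n'] ((List.splitOn '\n' text.toList).map pvProcLine))

-- ===== PRECONDITION & SPEC =====
def Spec_to_train_case_py (text : String) (out : String) : Prop := out = to_train_case_py_alt text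
instance (text : String) (out : String) : Decidable (Spec_to_train_case_py text out) := by unfold Spec_to_train_case_py; infer_instance

-- ===== CLAIM (what is proved, stated in full; the proofs are below) =====
def Claim_equal_to_train_case_py : Prop := ∀ (text : String), Dom_to_train_case_py text → Spec_to_train_case_py text (to_train_case_py text)

-- ===== LEMMAS AND PROOFS =====

-- recursive characterization of A's loop (output suffix still to be produced, given the flag)
def pvEmit : Bool → List Char → List Char
  | _, [] => []
  | flag, c :: rest =>
    if PySem.Chars.isalnum c then
      (if flag then PySem.Chars.upperChar c else PySem.Chars.lowerChar c) :: pvEmit false rest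
    else if c = '\n' then
      c :: pvEmit true rest
    else if !flag && pvHeadAlnum rest then
      '-' :: pvEmit true rest
    else pvEmit flag rest

-- maximal alnum runs, recursively
def pvWords : List Char → List (List Char)
  | [] => []
  | c :: l =>
    if PySem.Chars.isalnum c then
      (c :: l.takeWhile PySem.Chars.isalnum) :: pvWords (l.dropWhile PySem.Chars.isalnum)
    else pvWords l
termination_by l => l.length
decreasing_by
· simpa using Nat.lt_succ_of_le (List.length_dropWhile_le _ _)
· simp

def pvDash (r : List Char) : List Char :=
  if pvWords r = [] then [] else '-' :: List.intercalate ['-'] ((pvWords r).map pvCapWord)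

theorem pvALoop_eq_emit : ∀ (l : List Char) (flag : Bool) (out : List Char),
    pvALoop flag out l = out ++ pvEmit flag l := by
  intro l
  induction l with
  | nil => intro flag out; simp [pvALoop, pvEmit]
  | cons c rest ih =>
    intro flag out
    simp only [pvALoop, pvEmit]
    split_ifs <;> simp [ih] <;> simp_all

theorem pvIntercalate_cons {α : Type} (sep a : List α) (t : List (List α)) :
    List.intercalate sep (a :: t) = a ++ (if t = [] then [] else sep ++ List.intercalate sep t) := by
  cases t <;> simp [List.intercalate, List.intersperse]

theorem pvLineWords_acc : ∀ (l : List Char) (ws : List (List Char)) (cur : List Char),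
    pvLineWords ws cur l = ws ++ pvLineWords [] cur l := by
  intro l
  induction l with
  | nil => intro ws cur; simp only [pvLineWords]; split_ifs <;> simp
  | cons c rest ih =>
    intro ws cur
    simp only [pvLineWords]
    split_ifs with h1 h2
    · exact ih ws (cur ++ [c])
    · rw [ih (ws ++ [cur]) [], ih ([] ++ [cur]) []]; simp
    · exact ih ws cur

theorem pvLineWords_eq_words : ∀ (n : Nat) (l : List Char), l.length ≤ n →
    (pvLineWords [] [] l = pvWords l ∧
     ∀ cur : List Char, cur ≠ [] →
       pvLineWords [] cur l = (cur ++ l.takeWhile PySem.Chars.isalnum) :: pvWords (l.dropWhile PySem.Chars.isalnum)) := by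
  intro n
  induction n with
  | zero =>
    intro l hl
    have : l = [] := List.length_eq_zero_iff.mp (Nat.le_zero.mp hl)
    subst this
    refine ⟨by simp [pvLineWords, pvWords], fun cur hcur => by simp [pvLineWords, pvWords, hcur]⟩
  | succ n ih =>
    intro l hl
    cases l with
    | nil =>
      refine ⟨by simp [pvLineWords, pvWords], fun cur hcur => by simp [pvLineWords, pvWords, hcur]⟩
    | cons c rest =>
      have hr : rest.length ≤ n := by simpa using Nat.lt_succ_iff.mp (Nat.lt_of_lt_of_le (by simp) hl)
      constructor
      · simp only [pvLineWords, pvWords]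
        by_cases h : PySem.Chars.isalnum c
        · simpa [h] using (ih rest hr).2 [c] (by simp)
        · simpa [h] using (ih rest hr).1
      · intro cur hcur
        simp only [pvLineWords]
        by_cases h : PySem.Chars.isalnum c
        · rw [if_pos h, (ih rest hr).2 (cur ++ [c]) (by simp)]
          simp [h]
        · rw [if_neg h, if_pos hcur, pvLineWords_acc, (ih rest hr).1]
          simp [pvWords, h]

theorem pvEmit_eq_words : ∀ (n : Nat) (l : List Char), l.length ≤ n → '\n' ∉ l →
    (pvEmit true l = List.intercalate ['-'] ((pvWords l).map pvCapWord) ∧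
     pvEmit false l = (l.takeWhile PySem.Chars.isalnum).map PySem.Chars.lowerChar ++ pvDash (l.dropWhile PySem.Chars.isalnum)) := by
  intro n
  induction n with
  | zero =>
    intro l hl _
    have : l = [] := List.length_eq_zero_iff.mp (Nat.le_zero.mp hl)
    subst this
    exact ⟨by simp [pvEmit, pvWords, List.intercalate], by simp [pvEmit, pvDash, pvWords]⟩
  | succ n ih =>
    intro l hl hnl
    cases l with
    | nil => exact ⟨by simp [pvEmit, pvWords, List.intercalate], by simp [pvEmit, pvDash, pvWords]⟩
    | cons c rest =>
      have hr : rest.length ≤ n := by simpa using Nat.lt_succ_iff.mp (Nat.lt_of_lt_of_le (by simp) hl)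
      have hnc : c ≠ '\n' := fun h => hnl (h ▸ List.mem_cons_self)
      have hnr : '\n' ∉ rest := fun h => hnl (List.mem_cons_of_mem _ h)
      constructor
      · -- flag = true
        by_cases h : PySem.Chars.isalnum c
        · simp only [pvEmit, pvWords, if_pos h, List.map_cons, pvCapWord]
          rw [pvIntercalate_cons, (ih rest hr hnr).2]
          by_cases hw : pvWords (rest.dropWhile PySem.Chars.isalnum) = []
          · simp [pvDash, hw]
          · simp [pvDash, hw]
        · simp only [pvEmit, pvWords, if_pos, if_neg h, if_neg hnc]
          have : (!true && pvHeadAlnum rest) = false := by simp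
          rw [this]
          simpa using (ih rest hr hnr).1
      · -- flag = false
        by_cases h : PySem.Chars.isalnum c
        · simp only [pvEmit, if_pos h, List.takeWhile_cons_of_pos h, List.dropWhile_cons_of_pos h,
            List.map_cons]
          rw [(ih rest hr hnr).2]
          simp
        · simp only [List.takeWhile_cons_of_neg h, List.dropWhile_cons_of_neg h, List.map_nil,
            List.nil_append]
          simp only [pvEmit, if_neg h, if_neg hnc]
          cases rest with
          | nil => simp [pvEmit, pvHeadAlnum, pvDash, pvWords, h]
          | cons a rest' =>
            by_cases ha : PySem.Chars.isalnum a
            · simp only [pvHeadAlnum, ha]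
              have hw : pvWords (c :: a :: rest') ≠ [] := by
                simp [pvWords, h, ha]
              simp only [pvDash, if_neg hw]
              have : pvWords (c :: a :: rest') = pvWords (a :: rest') := by simp [pvWords, h]
              rw [this, (ih (a :: rest') hr hnr).1]
              simp
            · simp only [pvHeadAlnum, ha, Bool.and_false, Bool.false_eq_true, if_neg,
                not_false_iff]

              rw [(ih (a :: rest') hr hnr).2]
              simp only [List.takeWhile_cons_of_neg ha, List.dropWhile_cons_of_neg ha,
                List.map_nil, List.nil_append]
              have : pvWords (c :: a :: rest') = pvWords (a :: rest') := by simp [pvWords, h]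
              simp [pvDash, this]

theorem pvIsalnum_newline : PySem.Chars.isalnum '\n' = false := by decide

theorem pvEmit_append_newline : ∀ (l1 : List Char) (flag : Bool) (l2 : List Char), '\n' ∉ l1 →
    pvEmit flag (l1 ++ '\n' :: l2) = pvEmit flag l1 ++ '\n' :: pvEmit true l2 := by
  intro l1
  induction l1 with
  | nil => intro flag l2 _; simp [pvEmit, pvIsalnum_newline]
  | cons c r ih =>
    intro flag l2 hn
    have hnc : c ≠ '\n' := fun h => hn (h ▸ List.mem_cons_self)
    have hnr : '\n' ∉ r := fun h => hn (List.mem_cons_of_mem _ h)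
    simp only [List.cons_append, pvEmit, if_neg hnc]
    by_cases h : PySem.Chars.isalnum c
    · simp [h, ih false l2 hnr]
    · simp only [if_neg h]
      cases r with
      | nil => simp [pvEmit, pvHeadAlnum, pvIsalnum_newline]
      | cons a r' =>
        have hhd : pvHeadAlnum ((a :: r') ++ '\n' :: l2) = pvHeadAlnum (a :: r') := rfl
        simp only [List.cons_append] at hhd ⊢
        rw [hhd]
        split_ifs with hc
        · rw [show a :: (r' ++ '\n' :: l2) = (a :: r') ++ '\n' :: l2 from rfl, ih true l2 hnr]
          simp
        · exact ih flag l2 hnr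

theorem pvEmit_intercalate : ∀ (ps : List (List Char)), ps ≠ [] → (∀ p ∈ ps, '\n' ∉ p) →
    pvEmit true (List.intercalate ['\n'] ps) = List.intercalate ['\n'] (ps.map (pvEmit true)) := by
  intro ps
  induction ps with
  | nil => simp
  | cons p t ih =>
    intro _ hfree
    cases t with
    | nil => simp [List.intercalate]
    | cons q t' =>
      have h1 : List.intercalate ['\n'] (p :: q :: t') = p ++ '\n' :: List.intercalate ['\n'] (q :: t') := by
        rw [pvIntercalate_cons]; simp
      rw [h1, pvEmit_append_newline p true _ (hfree p List.mem_cons_self),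
        ih (by simp) (fun x hx => hfree x (List.mem_cons_of_mem _ hx)),
        List.map_cons, List.map_cons, pvIntercalate_cons, pvIntercalate_cons]
      simp
      rw [pvIntercalate_cons]
      cases t' <;> simp

theorem pvSplitOn_no_sep : ∀ (l : List Char) (p : List Char), p ∈ List.splitOn '\n' l → '\n' ∉ p := by
  intro l
  have key : ∀ (l : List Char) (p : List Char), p ∈ List.splitOnP (· == '\n') l → '\n' ∉ p := by
    intro l
    induction l with
    | nil => intro p hp; simp [List.splitOnP_nil] at hp; simp [hp]
    | cons c r ih =>
      intro p hp
      rw [List.splitOnP_cons] at hp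
      by_cases hc : c = '\n'
      · simp [hc] at hp
        rcases hp with hp | hp
        · simp [hp]
        · exact ih p hp
      · have hbeq : (c == '\n') = false := by simp [hc]
        rw [hbeq] at hp
        simp only [if_neg (by simp : ¬false = true)] at hp
        rcases hx : List.splitOnP (· == '\n') r with _ | ⟨h0, t0⟩
        · exact absurd hx (List.splitOnP_ne_nil _ _)
        · rw [hx] at hp
          simp only [List.modifyHead] at hp
          rcases List.mem_cons.mp hp with hp | hp
          · subst hp
            intro hmem
            rcases List.mem_cons.mp hmem with h | h
            · exact hc h.symm
            · exact ih h0 (hx ▸ List.mem_cons_self) h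
          · exact ih p (hx ▸ List.mem_cons_of_mem _ hp)
  exact key l

theorem pvFinal : ∀ (l : List Char),
    pvEmit true l = List.intercalate ['\n'] ((List.splitOn '\n' l).map pvProcLine) := by
  intro l
  have hfree := pvSplitOn_no_sep l
  have hne : List.splitOn '\n' l ≠ [] := by
    rw [show List.splitOn '\n' l = List.splitOnP (· == '\n') l from rfl]
    exact List.splitOnP_ne_nil _ _
  conv_lhs => rw [← List.intercalate_splitOn l '\n']
  rw [pvEmit_intercalate _ hne hfree]
  congr 1
  apply List.map_congr_left
  intro p hp
  have hnp := hfree p hp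
  unfold pvProcLine
  rw [show PySem.Chars.join ['-'] ((pvLineWords [] [] p).map pvCapWord) =
        List.intercalate ['-'] ((pvLineWords [] [] p).map pvCapWord) from rfl,
    (pvLineWords_eq_words p.length p le_rfl).1]
  exact (pvEmit_eq_words p.length p le_rfl hnp).1

-- ===== VERDICT (by name: the statement is the Claim_ definition above) =====
theorem to_train_case_py_spec : Claim_equal_to_train_case_py := by
  intro text _
  unfold Spec_to_train_case_py to_train_case_py to_train_case_py_alt
  rw [pvALoop_eq_emit, List.nil_append,
    show PySem.Chars.join ['\n'] ((List.splitOn '\n' text.toList).map pvProcLine) =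
      List.intercalate ['\n'] ((List.splitOn '\n' text.toList).map pvProcLine) from rfl,
    pvFinal]
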